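-- pv_equiv track=rewrite | github.com/cctutum/coding_practice_python | regex_01.py | replace_words_inString_oneLoop
-- ===== SOURCE A (Python) =====
-- def replace_words_inString_oneLoop(string: str,
--                                    word2remove: str,
--                                    word2replace: str) -> str:
--
--     temp_word = ""
--     output = ""
--
--     for i, letter in enumerate(string):
--         if letter != " ":
--             temp_word += letter
--         elif letter == " ":
--             if "apple" in temp_word:
--                 output += "pie "
--             else:
--                 output += f"{temp_word} "
--             temp_word = ""
--     output += temp_word
--     return output
-- ===== SOURCE B (Python) =====
-- def replace_words_inString_oneLoop(string: str,
--                                    word2remove: str,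
--                                    word2replace: str) -> str:
--     tokens = string.split(" ")
--     pieces = ["pie " if "apple" in t else t + " " for t in tokens[:-1]]
--     return "".join(pieces) + tokens[-1]
-- ===== Notes on version B (the rewrite author's own statement) =====
-- stated objective: simpler
-- what changed: A's character-by-character state machine (temp_word/output accumulators) is replaced by split(" ") plus a comprehension over all tokens but the last and a join; the unused word2remove/word2replace parameters are kept.
import Mathlib
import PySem

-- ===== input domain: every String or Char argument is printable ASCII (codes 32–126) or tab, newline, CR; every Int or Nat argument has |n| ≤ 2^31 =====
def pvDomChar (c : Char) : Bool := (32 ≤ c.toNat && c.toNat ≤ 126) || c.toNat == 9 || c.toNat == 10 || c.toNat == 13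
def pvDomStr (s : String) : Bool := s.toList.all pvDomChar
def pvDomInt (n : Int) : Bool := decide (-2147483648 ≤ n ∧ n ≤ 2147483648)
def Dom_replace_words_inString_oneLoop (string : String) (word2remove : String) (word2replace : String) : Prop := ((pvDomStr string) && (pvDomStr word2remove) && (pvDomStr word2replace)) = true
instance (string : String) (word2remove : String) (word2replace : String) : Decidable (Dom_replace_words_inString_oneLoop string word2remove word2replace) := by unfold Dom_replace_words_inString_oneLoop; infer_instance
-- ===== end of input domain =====

-- B replaces A's char-by-char state machine with split(" ") + per-token map + join (objective: simpler).

-- ===== PORT A =====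
-- one step of A's loop body on the state (temp_word, output)
def pvStepA (st : List Char × List Char) (letter : Char) : List Char × List Char :=
  if letter ≠ ' ' then (st.1 ++ [letter], st.2)
  else (([] : List Char),
        st.2 ++ (if PySem.Chars.isIn "apple".toList st.1 then "pie ".toList else st.1 ++ [' ']))

def replace_words_inString_oneLoop (string : String) (word2remove : String) (word2replace : String) : String :=
  let st := string.toList.foldl pvStepA (([] : List Char), ([] : List Char))
  String.mk (st.2 ++ st.1)

-- ===== PORT B =====
-- "pie " if "apple" in t else t + " "
def pvEmitB (t : List Char) : List Char :=
  if PySem.Chars.isIn "apple".toList t then "pie ".toList else t ++ [' ']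

def replace_words_inString_oneLoop_alt (string : String) (word2remove : String) (word2replace : String) : String :=
  let tokens := PySem.Chars.splitOn string.toList " ".toList
  let pieces := tokens.dropLast.map pvEmitB
  -- tokens[-1]: split always yields a non-empty list, so getLastD is exact here
  String.mk (pieces.flatten ++ tokens.getLastD [])

-- ===== PRECONDITION & SPEC =====
def Spec_replace_words_inString_oneLoop (string : String) (word2remove : String) (word2replace : String) (out : String) : Prop := out = replace_words_inString_oneLoop_alt string word2remove word2replace
instance (string : String) (word2remove : String) (word2replace : String) (out : String) : Decidable (Spec_replace_words_inString_oneLoop string word2remove word2replace out) := by unfold Spec_replace_words_inString_oneLoop; infer_instance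

-- ===== CLAIM (what is proved, stated in full; the proofs are below) =====
def Claim_equal_replace_words_inString_oneLoop : Prop := ∀ (string : String) (word2remove : String) (word2replace : String), Dom_replace_words_inString_oneLoop string word2remove word2replace → Spec_replace_words_inString_oneLoop string word2remove word2replace (replace_words_inString_oneLoop string word2remove word2replace)

-- ===== LEMMAS AND PROOFS =====

-- proof-side reference split on ' ' (structural recursion, no fuel)
def pvSplitSp : List Char → List (List Char)
  | [] => [[]]
  | c :: cs => if c = ' ' then [] :: pvSplitSp cs
               else match pvSplitSp cs with
                    | [] => [[c]]
                    | t :: ts => (c :: t) :: ts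

def pvConsHead (p : List Char) : List (List Char) → List (List Char)
  | [] => [p]
  | t :: ts => (p ++ t) :: ts

lemma pvSplitSp_ne_nil (cs : List Char) : pvSplitSp cs ≠ [] := by
  cases cs with
  | nil => simp [pvSplitSp]
  | cons c cs =>
    simp only [pvSplitSp]
    split
    · simp
    · cases h : pvSplitSp cs <;> simp

lemma pvSplitOn_go_eq (fuel : Nat) (l cur : List Char) (acc : List (List Char))
    (h : l.length < fuel) :
    PySem.Chars.splitOn.go [' '] fuel l cur acc
      = acc.reverse ++ pvConsHead cur.reverse (pvSplitSp l) := by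
  induction fuel generalizing l cur acc with
  | zero => omega
  | succ fuel ih =>
    cases l with
    | nil => simp [PySem.Chars.splitOn.go, pvSplitSp, pvConsHead]
    | cons c rest =>
      by_cases hc : c = ' '
      · subst hc
        have : ([' '].isPrefixOf (' ' :: rest)) = true := by simp [List.isPrefixOf]
        rw [PySem.Chars.splitOn.go]
        simp only [this, if_pos, List.length_cons, List.length_nil, List.drop_succ_cons,
          List.drop_zero]
        rw [ih rest [] ((cur.reverse) :: acc) (by simp at h ⊢; omega)]
        have hne := pvSplitSp_ne_nil rest
        cases hs : pvSplitSp rest with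
        | nil => exact absurd hs hne
        | cons t ts => simp [pvSplitSp, pvConsHead, hs]
      · have : ([' '].isPrefixOf (c :: rest)) = false := by
          simp [List.isPrefixOf]; exact fun hh => (hc hh.symm).elim
        rw [PySem.Chars.splitOn.go]
        simp only [this, Bool.false_eq_true, if_false]
        rw [ih rest (c :: cur) acc (by simp at h ⊢; omega)]
        have hne := pvSplitSp_ne_nil rest
        cases hs : pvSplitSp rest with
        | nil => exact absurd hs hne
        | cons t ts => simp [pvSplitSp, hc, pvConsHead, hs]

lemma pvSplitOn_eq_splitSp (cs : List Char) :
    PySem.Chars.splitOn cs [' '] = pvSplitSp cs := by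
  have hgo := pvSplitOn_go_eq (cs.length + 1) cs [] [] (by omega)
  have hne := pvSplitSp_ne_nil cs
  cases hs : pvSplitSp cs with
  | nil => exact absurd hs hne
  | cons t ts =>
    rw [hs] at hgo
    simpa [PySem.Chars.splitOn, pvConsHead, hs] using hgo

-- B's pieces/join computation on a token list, expressed recursively
def pvRender : List (List Char) → List Char
  | [] => []
  | [t] => t
  | t :: ts => pvEmitB t ++ pvRender ts

lemma pvRender_eq (ts : List (List Char)) (h : ts ≠ []) :
    (ts.dropLast.map pvEmitB).flatten ++ ts.getLastD [] = pvRender ts := by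
  induction ts with
  | nil => exact absurd rfl h
  | cons t ts ih =>
    cases ts with
    | nil => simp [pvRender]
    | cons u us =>
      have := ih (by simp)
      simp only [List.dropLast_cons₂, List.map_cons, List.flatten_cons, List.getLastD_cons,
        pvRender] at *
      rw [List.append_assoc, this]

lemma pvFoldA_eq (cs temp out : List Char) :
    (let st := cs.foldl pvStepA (temp, out); st.2 ++ st.1)
      = out ++ pvRender (pvConsHead temp (pvSplitSp cs)) := by
  induction cs generalizing temp out with
  | nil => simp [pvSplitSp, pvConsHead, pvRender]
  | cons c cs ih =>
    by_cases hc : c = ' '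
    · subst hc
      simp only [List.foldl_cons, pvStepA]
      rw [if_neg (by simp)]
      rw [ih [] (out ++ (if PySem.Chars.isIn "apple".toList temp then "pie ".toList else temp ++ [' ']))]
      have hne := pvSplitSp_ne_nil cs
      cases hs : pvSplitSp cs with
      | nil => exact absurd hs hne
      | cons t ts =>
        simp [pvSplitSp, hs, pvConsHead, pvRender, pvEmitB, List.append_assoc]
    · simp only [List.foldl_cons, pvStepA, ne_eq, hc, not_false_eq_true, if_pos]
      rw [ih (temp ++ [c]) out]
      have hne := pvSplitSp_ne_nil cs
      cases hs : pvSplitSp cs with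
      | nil => exact absurd hs hne
      | cons t ts => simp [pvSplitSp, hc, hs, pvConsHead]

-- ===== VERDICT (by name: the statement is the Claim_ definition above) =====
theorem replace_words_inString_oneLoop_spec : Claim_equal_replace_words_inString_oneLoop := by
  intro s w1 w2 _
  unfold Spec_replace_words_inString_oneLoop
  show String.mk ((List.foldl pvStepA ([], []) s.toList).2 ++ (List.foldl pvStepA ([], []) s.toList).1)
      = String.mk (((PySem.Chars.splitOn s.toList " ".toList).dropLast.map pvEmitB).flatten
          ++ (PySem.Chars.splitOn s.toList " ".toList).getLastD [])
  have hsep : (" ".toList : List Char) = [' '] := rfl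
  rw [hsep, pvSplitOn_eq_splitSp, pvRender_eq _ (pvSplitSp_ne_nil s.toList)]
  have hfold := pvFoldA_eq s.toList [] []
  simp only [List.nil_append] at hfold
  rw [hfold]
  have hch : pvConsHead [] (pvSplitSp s.toList) = pvSplitSp s.toList := by
    cases hs : pvSplitSp s.toList with
    | nil => exact absurd hs (pvSplitSp_ne_nil _)
    | cons t ts => simp [pvConsHead]
  rw [hch]
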